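-- pv_equiv track=rewrite | github.com/2761079/async-synth | synthNK.py | equivalence
-- ===== SOURCE A (Python) =====
-- def equivalence(config):
-- 		S = []
-- 		cur = config
-- 		rcur = reverse(cur)
-- 		for i in range(len(config)) :
-- 			cur = next(cur)
-- 			rcur = reverse(cur)
-- 			p = min(cur,rcur)
-- 			S.append(p)
-- 		return (min(S))
--
-- def reverse(config):
-- 		return config[::-1]
--
-- def next(config):
-- 		return config[1::]+config[0:1]
-- ===== SOURCE B (Python) =====
-- def equivalence(config):
--     n = len(config)
--     d = config + config
--     r = config[::-1]
--     dr = r + r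
--     return min([d[i:i+n] for i in range(n)] + [dr[i:i+n] for i in range(n)])
-- ===== Notes on version B (the rewrite author's own statement) =====
-- stated objective: simpler
-- what changed: B replaces A's loop of repeated next()/reverse() state updates and pairwise mins with a direct one-liner: slice all rotations out of the doubled list config+config (and of the doubled reversed list) and take one lexicographic min over all candidates.
import Mathlib
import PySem

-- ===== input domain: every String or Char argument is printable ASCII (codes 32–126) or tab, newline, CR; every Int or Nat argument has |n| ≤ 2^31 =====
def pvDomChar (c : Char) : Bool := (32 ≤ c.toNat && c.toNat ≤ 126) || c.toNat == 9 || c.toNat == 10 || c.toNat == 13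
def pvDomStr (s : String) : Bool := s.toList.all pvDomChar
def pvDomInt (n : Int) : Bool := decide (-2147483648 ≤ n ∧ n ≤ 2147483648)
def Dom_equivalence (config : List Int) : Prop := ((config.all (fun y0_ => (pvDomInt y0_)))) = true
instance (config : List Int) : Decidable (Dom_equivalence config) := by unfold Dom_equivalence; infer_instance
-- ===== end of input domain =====

-- B replaces A's loop of repeated next()/reverse() state updates and pairwise mins with a
-- single lexicographic min over all rotations sliced out of the doubled list config+config
-- and of the doubled reversed list; objective: simpler (same O(n^2) cost, no speed claim).


-- ===== PORT A =====
-- helper 'reverse(config)': config[::-1]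
def pyReverse (config : List Int) : List Int :=
  (PySem.List.slice? config none none (-1)).getD []
-- helper 'next(config)': config[1::] + config[0:1]
def pyNext (config : List Int) : List Int :=
  PySem.List.slice config (some 1) none ++ PySem.List.slice config (some 0) (some 1)

-- the initial 'rcur = reverse(cur)' before the loop is dead (overwritten before any read),
-- so the loop state is (S, cur); min(S) raises on the empty S in Python (excluded by Pre_).
def equivalence (config : List Int) : List Int :=
  let st := (PySem.List.pyRange 0 config.length 1).foldl
    (fun (st : List (List Int) × List Int) _ =>
      let cur := pyNext st.2
      let rcur := pyReverse cur
      let p := min cur rcur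
      (st.1 ++ [p], cur))
    ([], config)
  (PySem.List.min? st.1 (fun x => x)).getD []

-- ===== PORT B =====
def equivalence_alt (config : List Int) : List Int :=
  let n : Int := config.length
  let d := config ++ config
  let r := (PySem.List.slice? config none none (-1)).getD []
  let dr := r ++ r
  let cands :=
    (PySem.List.pyRange 0 n 1).map (fun i => PySem.List.slice d (some i) (some (i + n)))
    ++ (PySem.List.pyRange 0 n 1).map (fun i => PySem.List.slice dr (some i) (some (i + n)))
  (PySem.List.min? cands (fun x => x)).getD []

-- ===== PRECONDITION & SPEC =====
-- Pre_ excludes only the empty list, on which A (and B) raise ValueError from min of an empty sequence.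
def Pre_equivalence (config : List Int) : Prop := config ≠ []
instance (config : List Int) : Decidable (Pre_equivalence config) := by unfold Pre_equivalence; infer_instance
def pvWitness_equivalence : List Int := ([2, 1, 3])

def Spec_equivalence (config : List Int) (out : List Int) : Prop := out = equivalence_alt config
instance (config : List Int) (out : List Int) : Decidable (Spec_equivalence config out) := by unfold Spec_equivalence; infer_instance

-- ===== CLAIM (what is proved, stated in full; the proofs are below) =====
def Claim_equal_equivalence : Prop := ∀ (config : List Int), Dom_equivalence config → Pre_equivalence config → Spec_equivalence config (equivalence config)

-- ===== LEMMAS AND PROOFS =====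

-- rotation by k: the yardstick both ports are reduced to
def rot (l : List Int) (k : Nat) : List Int := l.drop k ++ l.take k

theorem pyNext_eq (l : List Int) : pyNext l = l.drop 1 ++ l.take 1 := by
  simp [pyNext, PySem.List.slice_from_one, PySem.List.slice_zero_start, PySem.List.slice_to]

theorem pyNext_rot (l : List Int) (k : Nat) (hk : k < l.length) :
    pyNext (rot l k) = rot l (k + 1) := by
  rw [pyNext_eq, rot, rot]
  rw [List.drop_append_of_le_length (by simp; omega), List.take_append]
  have h0 : 1 - (l.drop k).length = 0 := by simp; omega
  rw [h0, List.take_zero, List.append_nil, List.drop_drop, List.take_add, List.append_assoc]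

theorem iter_pyNext_rot (l : List Int) (k : Nat) (hk : k ≤ l.length) :
    pyNext^[k] l = rot l k := by
  induction k with
  | zero => simp [rot]
  | succ m ih => rw [Function.iterate_succ_apply', ih (by omega), pyNext_rot l m (by omega)]

theorem reverse_rot (l : List Int) (k : Nat) :
    (rot l k).reverse = rot l.reverse (l.length - k) := by
  simp [rot, List.reverse_append, List.reverse_take, List.reverse_drop]

theorem loopA (ys : List Int) (S : List (List Int)) (c : List Int) :
    ys.foldl
      (fun (st : List (List Int) × List Int) _ =>
        (st.1 ++ [min (pyNext st.2) (pyReverse (pyNext st.2))], pyNext st.2))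
      (S, c)
    = (S ++ (List.range ys.length).map
          (fun i => min (pyNext^[i + 1] c) (pyNext^[i + 1] c).reverse),
       pyNext^[ys.length] c) := by
  induction ys generalizing S c with
  | nil => simp
  | cons y t ih =>
      simp only [List.foldl_cons, ih, List.length_cons]
      rw [Prod.mk.injEq]
      constructor
      · simp [pyReverse, PySem.List.slice?_none_none_neg_one, List.range_succ_eq_map,
          Function.iterate_succ_apply, Function.comp]
      · simp [Function.iterate_succ_apply]

theorem pyRange_natCast (n : Nat) :
    PySem.List.pyRange 0 n 1 = (List.range n).map (fun (k : Nat) => (k : Int)) := by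
  induction n with
  | zero => simp [PySem.List.pyRange_one_eq_nil]
  | succ k ih =>
      have hcast : ((k + 1 : Nat) : Int) = (k : Int) + 1 := by push_cast; ring
      rw [hcast, PySem.List.pyRange_one_succ_right (by positivity), ih, List.range_succ]
      simp

-- bridge: min?_isMin restated for the default LT/DecidableLT instances the ports elaborate with
theorem min?_isMin' {xs : List (List Int)} {m : List Int}
    (h : PySem.List.min? xs (fun x => x) = some m) : ∀ y ∈ xs, m ≤ y := by
  have h2 : @PySem.List.min? (List Int) (List Int) _ LinearOrder.toDecidableLT xs (fun x => x) = some m := by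
    convert h using 2
  exact PySem.List.min?_isMin h2

theorem slice_doubled (l : List Int) (i : Nat) (hi : i ≤ l.length) :
    PySem.List.slice (l ++ l) (some (i : Int)) (some ((i : Int) + (l.length : Int)))
      = rot l i := by
  rw [PySem.List.slice_natCast_add, List.drop_append_of_le_length hi, List.take_append]
  have h1 : (l.drop i).length = l.length - i := by simp
  rw [rot, List.take_of_length_le (by omega), h1]
  congr 2
  omega

-- the two candidate lists, in terms of rot
def SA (c : List Int) : List (List Int) :=
  (List.range c.length).map (fun i => min (rot c (i + 1)) (rot c (i + 1)).reverse)
def SB (c : List Int) : List (List Int) :=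
  (List.range c.length).map (fun i => rot c i)
  ++ (List.range c.length).map (fun i => rot c.reverse i)

theorem equivalence_eq_SA (c : List Int) :
    equivalence c = (PySem.List.min? (SA c) (fun x => x)).getD [] := by
  show (PySem.List.min? ((PySem.List.pyRange 0 c.length 1).foldl
      (fun (st : List (List Int) × List Int) _ =>
        (st.1 ++ [min (pyNext st.2) (pyReverse (pyNext st.2))], pyNext st.2))
      ([], c)).1 (fun x => x)).getD [] = _
  rw [loopA]
  have hlen : (PySem.List.pyRange 0 (c.length : Int) 1).length = c.length := by
    rw [PySem.List.length_pyRange_one]; simp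
  rw [hlen]
  congr 2
  simp only [SA, List.nil_append]
  exact List.map_congr_left (fun i hi => by
    rw [iter_pyNext_rot c (i + 1) (by simpa using List.mem_range.mp hi)])

theorem mapB1 (c : List Int) :
    ((List.range c.length).map (fun (k : Nat) => (k : Int))).map
      (fun i => PySem.List.slice (c ++ c) (some i) (some (i + (c.length : Int))))
    = (List.range c.length).map (fun i => rot c i) := by
  rw [List.map_map]
  refine List.map_congr_left (fun i hi => ?_)
  simpa using slice_doubled c i (le_of_lt (List.mem_range.mp hi))

theorem mapB2 (c : List Int) :
    ((List.range c.length).map (fun (k : Nat) => (k : Int))).map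
      (fun i => PySem.List.slice (c.reverse ++ c.reverse) (some i) (some (i + (c.length : Int))))
    = (List.range c.length).map (fun i => rot c.reverse i) := by
  rw [List.map_map]
  refine List.map_congr_left (fun i hi => ?_)
  have h := slice_doubled c.reverse i (by simpa using le_of_lt (List.mem_range.mp hi))
  simpa using h

theorem equivalence_alt_eq_SB (c : List Int) :
    equivalence_alt c = (PySem.List.min? (SB c) (fun x => x)).getD [] := by
  show (PySem.List.min? (
      (PySem.List.pyRange 0 (c.length : Int) 1).map
        (fun i => PySem.List.slice (c ++ c) (some i) (some (i + (c.length : Int))))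
      ++ (PySem.List.pyRange 0 (c.length : Int) 1).map
        (fun i => PySem.List.slice
          ((PySem.List.slice? c none none (-1)).getD [] ++ (PySem.List.slice? c none none (-1)).getD [])
          (some i) (some (i + (c.length : Int))))) (fun x => x)).getD [] = _
  rw [PySem.List.slice?_none_none_neg_one]
  simp only [Option.getD_some]
  rw [pyRange_natCast, mapB1 c, mapB2 c]
  rfl

theorem a_le_rot (c : List Int) (a : List Int)
    (ha : PySem.List.min? (SA c) (fun x => x) = some a)
    (k : Nat) (h1 : 1 ≤ k) (h2 : k ≤ c.length) :
    a ≤ rot c k ∧ a ≤ (rot c k).reverse := by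
  have hmem : min (rot c k) (rot c k).reverse ∈ SA c := by
    refine List.mem_map.mpr ⟨k - 1, List.mem_range.mpr (by omega), ?_⟩
    have : k - 1 + 1 = k := by omega
    rw [this]
  have hle := min?_isMin' ha _ hmem
  exact ⟨le_trans hle (min_le_left _ _), le_trans hle (min_le_right _ _)⟩

theorem rot_length_eq (l : List Int) : rot l l.length = rot l 0 := by simp [rot]

theorem min_eq_min (c : List Int) (h : c ≠ []) :
    (PySem.List.min? (SA c) (fun x => x)).getD []
      = (PySem.List.min? (SB c) (fun x => x)).getD [] := by
  have hn : 0 < c.length := List.length_pos_iff.mpr h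
  have hSA : SA c ≠ [] := by simp [SA]; omega
  have hSB : SB c ≠ [] := by simp [SB]; omega
  rcases ha : PySem.List.min? (SA c) (fun x => x) with _ | a
  · exact absurd ((PySem.List.min?_eq_none_iff _ _).mp ha) hSA
  rcases hb : PySem.List.min? (SB c) (fun x => x) with _ | b
  · exact absurd ((PySem.List.min?_eq_none_iff _ _).mp hb) hSB
  simp only [Option.getD_some]
  apply le_antisymm
  · -- a ≤ b : b is in SB, and a is below every element of SB
    have hbmem := PySem.List.min?_mem hb
    rcases List.mem_append.mp hbmem with hl | hr
    · obtain ⟨j, hj, rfl⟩ := List.mem_map.mp hl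
      have hj' := List.mem_range.mp hj
      by_cases hj0 : j = 0
      · subst hj0
        rw [← rot_length_eq]
        exact (a_le_rot c a ha c.length hn le_rfl).1
      · exact (a_le_rot c a ha j (by omega) (by omega)).1
    · obtain ⟨j, hj, rfl⟩ := List.mem_map.mp hr
      have hj' := List.mem_range.mp hj
      have hrev : (rot c (c.length - j)).reverse = rot c.reverse j := by
        rw [reverse_rot]
        congr 1
        omega
      rw [← hrev]
      exact (a_le_rot c a ha (c.length - j) (by omega) (by omega)).2
  · -- b ≤ a : a is in SA, and b is below every element of SB
    have hamem := PySem.List.min?_mem ha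
    obtain ⟨i, hi, rfl⟩ := List.mem_map.mp hamem
    have hi' := List.mem_range.mp hi
    have hb_all := min?_isMin' hb
    have h1 : b ≤ rot c (i + 1) := by
      by_cases hend : i + 1 = c.length
      · rw [hend, rot_length_eq]
        exact hb_all _ (List.mem_append.mpr (Or.inl
          (List.mem_map.mpr ⟨0, List.mem_range.mpr hn, rfl⟩)))
      · exact hb_all _ (List.mem_append.mpr (Or.inl
          (List.mem_map.mpr ⟨i + 1, List.mem_range.mpr (by omega), rfl⟩)))
    have h2 : b ≤ (rot c (i + 1)).reverse := by
      rw [reverse_rot]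
      exact hb_all _ (List.mem_append.mpr (Or.inr
        (List.mem_map.mpr ⟨c.length - (i + 1), List.mem_range.mpr (by omega), rfl⟩)))
    exact le_min h1 h2

-- ===== VERDICT (by name: the statement is the Claim_ definition above) =====
theorem equivalence_spec : Claim_equal_equivalence := by
  intro config _ hpre
  show equivalence config = equivalence_alt config
  rw [equivalence_eq_SA, equivalence_alt_eq_SB]
  exact min_eq_min config hpre
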